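-- pv_equiv track=rewrite | github.com/Natanal-H/algorithm | programmers/모든 문제/level 2/힙/더_맵게.py | solution
-- ===== SOURCE A (Python) =====
-- import heapq
--
-- def solution(scoville, K):
--     answer, heap = 0, []
--
--     for s in scoville : heapq.heappush(heap, s)
--
--     while len(heap) > 1:
--         if heap[0] >= K : return answer
--
--         h1 = heapq.heappop(heap)
--         h2 = heapq.heappop(heap)
--         heapq.heappush(heap, h1 + h2*2)
--         answer += 1
--
--     if heap[0] >= K : return answer
--     return -1
-- ===== SOURCE B (Python) =====
-- def solution(scoville, K):
--     foods = list(scoville)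
--     count = 0
--     while True:
--         m1 = min(foods)
--         if m1 >= K:
--             return count
--         if len(foods) == 1:
--             return -1
--         foods.remove(m1)
--         m2 = min(foods)
--         foods.remove(m2)
--         foods.append(m1 + 2 * m2)
--         count += 1
-- ===== Notes on version B (the rewrite author's own statement) =====
-- stated objective: simpler
-- what changed: Drops the heap entirely: an unordered list is kept and the two smallest elements are found each round by a linear min-scan (min/remove) and the mix appended at the end, with a single while-True loop and dual exits instead of A's heapq push loop, while-len>1 loop and post-loop check.
import Mathlib
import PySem

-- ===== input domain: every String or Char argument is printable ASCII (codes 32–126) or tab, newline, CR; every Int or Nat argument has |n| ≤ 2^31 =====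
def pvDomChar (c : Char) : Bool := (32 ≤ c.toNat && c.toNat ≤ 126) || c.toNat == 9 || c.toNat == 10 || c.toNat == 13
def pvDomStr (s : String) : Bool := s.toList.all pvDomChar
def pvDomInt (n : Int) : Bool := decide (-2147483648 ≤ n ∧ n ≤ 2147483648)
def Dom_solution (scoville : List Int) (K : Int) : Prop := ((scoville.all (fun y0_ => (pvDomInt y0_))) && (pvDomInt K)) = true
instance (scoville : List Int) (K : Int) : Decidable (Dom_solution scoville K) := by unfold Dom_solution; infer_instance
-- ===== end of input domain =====

-- B keeps an unordered list and selects the two smallest by linear min-scans (min/remove) instead of A's heapq binary heap; equal return values proved on nonempty input.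

-- ===== PORT A =====
-- heapq's heap is ported as a priority queue (mergeable heap-ordered tree): heappush/heappop
-- push/pop the same values (the minimum) as Python's array heap on every sequence of calls,
-- which is exact here because the stored elements are plain ints (equal ties are indistinguishable).
inductive PHeap : Type
  | nil : PHeap
  | node : Int → PHeap → PHeap → PHeap

def PHeap.size : PHeap → Nat
  | .nil => 0
  | .node _ l r => 1 + l.size + r.size

-- fuel-based structural recursion (fuel > size a + size b always suffices; meld supplies it)
def PHeap.merge : Nat → PHeap → PHeap → PHeap
  | 0, _, _ => .nil
  | _+1, .nil, h => h
  | _+1, .node v l r, .nil => .node v l r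
  | fuel+1, .node x xl xr, .node y yl yr =>
    if x ≤ y then .node x (PHeap.merge fuel xr (.node y yl yr)) xl
    else .node y (PHeap.merge fuel yr (.node x xl xr)) yl

def PHeap.meld (a b : PHeap) : PHeap := PHeap.merge (a.size + b.size + 1) a b

-- heapq.heappush heap s
def PHeap.push (x : Int) (h : PHeap) : PHeap := PHeap.meld (.node x .nil .nil) h

-- heap[0]  (default 0 is never read: Pre_ excludes the empty heap)
def PHeap.peekD : PHeap → Int
  | .nil => 0
  | .node v _ _ => v

-- heapq.heappop heap  (default on the empty heap is never read: Pre_ excludes it)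
def PHeap.pop : PHeap → Int × PHeap
  | .nil => (0, .nil)
  | .node v l r => (v, PHeap.meld l r)

-- the while-loop of A; fuel = initial heap size bounds the iterations (each one shrinks the heap by 1)
def loopA (K : Int) : Nat → Int → PHeap → Int
  | 0, _, _ => 0
  | fuel+1, answer, h =>
    if 1 < h.size then
      if K ≤ h.peekD then answer
      else
        let p1 := h.pop
        let p2 := p1.2.pop
        loopA K fuel (answer + 1) (PHeap.push (p1.1 + p2.1 * 2) p2.2)
    else
      if K ≤ h.peekD then answer else -1

def solution (scoville : List Int) (K : Int) : Int :=
  loopA K scoville.length 0 (scoville.foldl (fun h s => PHeap.push s h) .nil)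

-- ===== PORT B =====
-- the while-True loop of B; fuel = list length bounds the iterations (each one shrinks the list by 1);
-- min(foods) → PySem.List.min?, foods.remove(m) → PySem.List.remove?, foods.append → ++ [·]
-- (the 'none'/fuel-0 defaults are unreachable: Pre_ excludes the empty list, where min([]) raises ValueError)
def loopB (K : Int) : Nat → Int → List Int → Int
  | 0, _, _ => 0
  | fuel+1, count, foods =>
    match PySem.List.min? foods (fun x => x) with
    | none => 0
    | some m1 =>
      if K ≤ m1 then count
      else if foods.length = 1 then -1
      else
        match PySem.List.remove? foods m1 with
        | none => 0
        | some foods1 =>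
          match PySem.List.min? foods1 (fun x => x) with
          | none => 0
          | some m2 =>
            match PySem.List.remove? foods1 m2 with
            | none => 0
            | some foods2 =>
              loopB K fuel (count + 1) (foods2 ++ [m1 + 2 * m2])

def solution_alt (scoville : List Int) (K : Int) : Int :=
  loopB K scoville.length 0 scoville

-- ===== PRECONDITION & SPEC =====
-- Pre_ excludes only the empty list, on which A raises IndexError (heap[0] on an empty heap); B raises there too (min of empty list).
def Pre_solution (scoville : List Int) (K : Int) : Prop := scoville ≠ []
instance (scoville : List Int) (K : Int) : Decidable (Pre_solution scoville K) := by unfold Pre_solution; infer_instance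

def pvWitness_solution : List Int × Int := ([1, 2, 3, 9, 10, 12], 7)

def Spec_solution (scoville : List Int) (K : Int) (out : Int) : Prop := out = solution_alt scoville K
instance (scoville : List Int) (K : Int) (out : Int) : Decidable (Spec_solution scoville K out) := by unfold Spec_solution; infer_instance

-- ===== CLAIM (what is proved, stated in full; the proofs are below) =====
def Claim_equal_solution : Prop := ∀ (scoville : List Int) (K : Int), Dom_solution scoville K → Pre_solution scoville K → Spec_solution scoville K (solution scoville K)

-- ===== LEMMAS AND PROOFS =====

def PHeap.toMS : PHeap → Multiset Int
  | .nil => 0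
  | .node v l r => v ::ₘ (l.toMS + r.toMS)

def PHeap.IsHeap : PHeap → Prop
  | .nil => True
  | .node v l r => (∀ y ∈ l.toMS + r.toMS, v ≤ y) ∧ l.IsHeap ∧ r.IsHeap

theorem PHeap.toMS_merge : ∀ (fuel : Nat) (a b : PHeap), a.size + b.size < fuel →
    (PHeap.merge fuel a b).toMS = a.toMS + b.toMS := by
  intro fuel
  induction fuel with
  | zero => intro a b hf; omega
  | succ fuel ih =>
    intro a b hf
    match a, b with
    | PHeap.nil, h => simp [PHeap.merge, PHeap.toMS]
    | PHeap.node v l r, PHeap.nil => simp [PHeap.merge, PHeap.toMS]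
    | PHeap.node x xl xr, PHeap.node y yl yr =>
      simp only [PHeap.size] at hf
      by_cases hle : x ≤ y
      · simp only [PHeap.merge, if_pos hle, PHeap.toMS]
        rw [ih xr (PHeap.node y yl yr) (by simp only [PHeap.size]; omega)]
        simp [PHeap.toMS, add_assoc, add_comm, Multiset.cons_swap]
      · simp only [PHeap.merge, if_neg hle, PHeap.toMS]
        rw [ih yr (PHeap.node x xl xr) (by simp only [PHeap.size]; omega)]
        simp [PHeap.toMS, add_assoc, add_left_comm, add_comm, Multiset.cons_swap]

theorem PHeap.toMS_meld (a b : PHeap) : (PHeap.meld a b).toMS = a.toMS + b.toMS :=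
  PHeap.toMS_merge _ a b (by omega)

theorem PHeap.size_eq_card (h : PHeap) : h.size = h.toMS.card := by
  induction h with
  | nil => simp [PHeap.size, PHeap.toMS]
  | node v l r ihl ihr => simp [PHeap.size, PHeap.toMS, ihl, ihr]; omega

theorem PHeap.IsHeap_merge : ∀ (fuel : Nat) (a b : PHeap), a.size + b.size < fuel →
    a.IsHeap → b.IsHeap → (PHeap.merge fuel a b).IsHeap := by
  intro fuel
  induction fuel with
  | zero => intro a b hf _ _; omega
  | succ fuel ih =>
    intro a b hf ha hb
    match a, b, ha, hb with
    | PHeap.nil, h, _, hb => simpa [PHeap.merge] using hb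
    | PHeap.node v l r, PHeap.nil, ha, _ => simpa [PHeap.merge] using ha
    | PHeap.node x xl xr, PHeap.node y yl yr, ha, hb =>
      simp only [PHeap.size] at hf
      obtain ⟨hax, haxl, haxr⟩ := ha
      obtain ⟨hby, hbyl, hbyr⟩ := hb
      by_cases hle : x ≤ y
      · simp only [PHeap.merge, if_pos hle]
        have hfr : xr.size + (PHeap.node y yl yr).size < fuel := by simp only [PHeap.size]; omega
        refine ⟨?_, ih xr (PHeap.node y yl yr) hfr haxr ⟨hby, hbyl, hbyr⟩, haxl⟩
        intro z hz
        rw [PHeap.toMS_merge _ _ _ hfr] at hz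
        simp only [Multiset.mem_add, PHeap.toMS, Multiset.mem_cons] at hz
        rcases hz with ((hz | (hz | hz)) | hz)
        · exact hax z (by simp [hz])
        · exact hle.trans (le_of_eq hz.symm)
        · exact hle.trans (hby z (by simp [hz]))
        · exact hax z (by simp [hz])
      · simp only [PHeap.merge, if_neg hle]
        have hfr : yr.size + (PHeap.node x xl xr).size < fuel := by simp only [PHeap.size]; omega
        refine ⟨?_, ih yr (PHeap.node x xl xr) hfr hbyr ⟨hax, haxl, haxr⟩, hbyl⟩
        intro z hz
        rw [PHeap.toMS_merge _ _ _ hfr] at hz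
        simp only [Multiset.mem_add, PHeap.toMS, Multiset.mem_cons] at hz
        have hyx : y ≤ x := by omega
        rcases hz with ((hz | (hz | hz)) | hz)
        · exact hby z (by simp [hz])
        · exact hyx.trans (le_of_eq hz.symm)
        · exact hyx.trans (hax z (by simp [hz]))
        · exact hby z (by simp [hz])

theorem PHeap.IsHeap_meld (a b : PHeap) (ha : a.IsHeap) (hb : b.IsHeap) : (PHeap.meld a b).IsHeap :=
  PHeap.IsHeap_merge _ a b (by omega) ha hb

theorem PHeap.toMS_push (x : Int) (h : PHeap) : (PHeap.push x h).toMS = x ::ₘ h.toMS := by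
  simp [PHeap.push, PHeap.toMS_meld, PHeap.toMS]

theorem PHeap.IsHeap_push (x : Int) (h : PHeap) (hh : h.IsHeap) : (PHeap.push x h).IsHeap := by
  refine PHeap.IsHeap_meld _ _ ?_ hh
  exact ⟨by simp [PHeap.toMS], trivial, trivial⟩

theorem PHeap.root_le {v : Int} {l r : PHeap} (hh : (PHeap.node v l r).IsHeap) :
    ∀ y ∈ (PHeap.node v l r).toMS, v ≤ y := by
  intro y hy
  simp only [PHeap.toMS, Multiset.mem_cons] at hy
  rcases hy with hy | hy
  · exact le_of_eq hy.symm
  · exact hh.1 y hy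

-- a nonempty heap and a list with the same multiset: Python's min of the list equals the root
theorem min_eq_root {v : Int} {l r : PHeap} {foods : List Int} {m : Int}
    (hh : (PHeap.node v l r).IsHeap) (hms : (PHeap.node v l r).toMS = ↑foods)
    (hmin : PySem.List.min? foods (fun x => x) = some m) : m = v := by
  have hmem : m ∈ foods := PySem.List.min?_mem hmin
  have hvm : v ≤ m := PHeap.root_le hh m (by rw [hms]; exact Multiset.mem_coe.mpr hmem)
  have hvfoods : v ∈ foods := by
    have : v ∈ (PHeap.node v l r).toMS := by simp [PHeap.toMS]
    rw [hms] at this; exact Multiset.mem_coe.mp this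
  have hmv : m ≤ v := PySem.List.min?_isMin hmin v hvfoods
  omega

theorem loop_eq (K : Int) : ∀ (fuel : Nat) (foods : List Int) (answer : Int) (h : PHeap),
    foods.length = fuel → foods ≠ [] → h.IsHeap → h.toMS = ↑foods →
    loopA K fuel answer h = loopB K fuel answer foods := by
  intro fuel
  induction fuel with
  | zero =>
    intro foods answer h hlen hne _ _
    exact absurd (List.length_eq_zero_iff.mp hlen) hne
  | succ fuel ih =>
    intro foods answer h hlen hne hheap hms
    have hsz : h.size = fuel + 1 := by rw [PHeap.size_eq_card, hms, Multiset.coe_card, hlen]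
    match h, hms, hheap with
    | PHeap.nil, hms, _ =>
      exact absurd hms.symm (by simpa [PHeap.toMS] using (Multiset.coe_eq_zero _).not.mpr hne)
    | PHeap.node v l r, hms, hheap =>
      obtain ⟨m1, hm1⟩ : ∃ m, PySem.List.min? foods (fun x => x) = some m := by
        rcases Option.eq_none_or_eq_some (PySem.List.min? foods (fun x => x)) with h0 | h0
        · exact absurd ((PySem.List.min?_eq_none_iff _ _).mp h0) hne
        · exact h0
      rw [min_eq_root hheap hms hm1] at hm1
      rw [loopA.eq_2, loopB.eq_2, hm1]
      dsimp only
      by_cases hK : K ≤ v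
      · -- both return answer, whatever the size
        by_cases hbig : 1 < (PHeap.node v l r).size
        · rw [if_pos hbig]; simp only [PHeap.peekD]; rw [if_pos hK, if_pos hK]
        · rw [if_neg hbig]; simp only [PHeap.peekD]; rw [if_pos hK, if_pos hK]
      · rw [if_neg hK]
        by_cases hone : foods.length = 1
        · have hbig : ¬ 1 < (PHeap.node v l r).size := by omega
          rw [if_neg hbig, if_pos hone]
          simp only [PHeap.peekD]
          rw [if_neg hK]
        · have hbig : 1 < (PHeap.node v l r).size := by omega
          rw [if_pos hbig, if_neg hone]
          simp only [PHeap.peekD]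
          rw [if_neg hK]
          -- A pops v; the remaining heap is meld l r with multiset foods.erase v
          have hvfoods : v ∈ foods := by
            have : v ∈ (PHeap.node v l r).toMS := by simp [PHeap.toMS]
            rw [hms] at this; exact Multiset.mem_coe.mp this
          have hrm1 : PySem.List.remove? foods v = some (foods.erase v) :=
            PySem.List.remove?_eq_some_erase foods v hvfoods
          rw [hrm1]
          dsimp only
          have hms1 : (l.meld r).toMS = ↑(foods.erase v) := by
            have h0 := hms
            simp only [PHeap.toMS] at h0
            rw [PHeap.toMS_meld, ← Multiset.coe_erase, ← h0, Multiset.erase_cons_head]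
          have hheap1 : (l.meld r).IsHeap := PHeap.IsHeap_meld l r hheap.2.1 hheap.2.2
          have hne1 : foods.erase v ≠ [] := by
            have : (foods.erase v).length = foods.length - 1 := List.length_erase_of_mem hvfoods
            intro hc; rw [hc] at this; simp at this; omega
          match hmr : l.meld r, hms1, hheap1 with
          | PHeap.nil, hms1, _ =>
            exact absurd hms1.symm (by simpa [PHeap.toMS] using (Multiset.coe_eq_zero _).not.mpr hne1)
          | PHeap.node v2 l2 r2, hms1, hheap1 =>
            obtain ⟨m2, hm2⟩ : ∃ m, PySem.List.min? (foods.erase v) (fun x => x) = some m := by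
              rcases Option.eq_none_or_eq_some (PySem.List.min? (foods.erase v) (fun x => x)) with h0 | h0
              · exact absurd ((PySem.List.min?_eq_none_iff _ _).mp h0) hne1
              · exact h0
            rw [min_eq_root hheap1 hms1 hm2] at hm2
            rw [hm2]
            dsimp only
            have hv2mem : v2 ∈ foods.erase v := by
              have : v2 ∈ (PHeap.node v2 l2 r2).toMS := by simp [PHeap.toMS]
              rw [hms1] at this; exact Multiset.mem_coe.mp this
            have hrm2 : PySem.List.remove? (foods.erase v) v2 = some ((foods.erase v).erase v2) :=
              PySem.List.remove?_eq_some_erase (foods.erase v) v2 hv2mem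
            rw [hrm2]
            dsimp only
            -- remaining multisets and the new element agree; recurse
            have hms2 : (l2.meld r2).toMS = ↑((foods.erase v).erase v2) := by
              have h0 := hms1
              simp only [PHeap.toMS] at h0
              rw [PHeap.toMS_meld, ← Multiset.coe_erase, ← h0, Multiset.erase_cons_head]
            have hheap2 : (l2.meld r2).IsHeap := PHeap.IsHeap_meld l2 r2 hheap1.2.1 hheap1.2.2
            set newlst := (foods.erase v).erase v2 ++ [v + 2 * v2] with hnew
            have hmsn : (PHeap.push (v + v2 * 2) (l2.meld r2)).toMS = ↑newlst := by
              rw [PHeap.toMS_push, hms2, hnew]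
              rw [show v + v2 * 2 = v + 2 * v2 by ring, Multiset.cons_coe]
              exact Multiset.coe_eq_coe.mpr (List.perm_append_singleton _ _).symm
            have hlen2 : (foods.erase v).length = fuel := by
              rw [List.length_erase_of_mem hvfoods, hlen]
              omega
            have hlenn : newlst.length = fuel := by
              rw [hnew, List.length_append, List.length_erase_of_mem hv2mem, hlen2]
              simp
              omega
            have hnen : newlst ≠ [] := by simp [hnew]
            simp only [PHeap.pop, hmr]
            exact ih newlst (answer + 1) _ hlenn hnen (PHeap.IsHeap_push _ _ hheap2) hmsn

theorem toMS_foldl (xs : List Int) : ∀ (h0 : PHeap),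
    (xs.foldl (fun h s => PHeap.push s h) h0).toMS = h0.toMS + ↑xs := by
  induction xs with
  | nil => intro h0; simp
  | cons x xs ihx =>
    intro h0
    simp only [List.foldl_cons, ihx, PHeap.toMS_push, ← Multiset.cons_coe]
    rw [Multiset.add_cons, Multiset.cons_add]

theorem IsHeap_foldl (xs : List Int) : ∀ (h0 : PHeap), h0.IsHeap →
    (xs.foldl (fun h s => PHeap.push s h) h0).IsHeap := by
  induction xs with
  | nil => intro h0 hh; exact hh
  | cons x xs ihx => intro h0 hh; exact ihx _ (PHeap.IsHeap_push _ _ hh)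

-- ===== VERDICT (by name: the statement is the Claim_ definition above) =====
theorem solution_spec : Claim_equal_solution := by
  intro scoville K _ hpre
  unfold Spec_solution solution solution_alt
  have hms : (scoville.foldl (fun h s => PHeap.push s h) .nil).toMS = ↑scoville := by
    rw [toMS_foldl]
    simp [PHeap.toMS]
  exact loop_eq K scoville.length scoville 0 _ rfl hpre (IsHeap_foldl _ _ trivial) hms
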